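-- pv_equiv track=rewrite | github.com/kismatkunwar89/VectorProbe | src/main.py | extract_live_hosts
-- ===== SOURCE A (Python) =====
-- def extract_live_hosts(nmap_output: str) -> list:
--     """Extract live host IPs from nmap -sn greppable output.
--
--     Args:
--         nmap_output: Raw nmap -sn -oG output
--
--     Returns:
--         List of live host IP addresses
--     """
--     live_hosts = []
--     for line in nmap_output.split('\n'):
--         if line.startswith('Host:') and 'Status: Up' in line:
--             # Extract IP from "Host: 192.168.1.1 () Status: Up"
--             parts = line.split()
--             if len(parts) >= 2:
--                 ip = parts[1]
--                 live_hosts.append(ip)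
--     return live_hosts
-- ===== SOURCE B (Python) =====
-- def _live_ip(line):
--     """Return the live-host IP of one greppable-output line, or None."""
--     if not (line.startswith('Host:') and 'Status: Up' in line):
--         return None
--     # second whitespace-separated token, found by direct scanning (no tokenization)
--     n = len(line)
--     i = 0
--     while i < n and not line[i].isspace():
--         i += 1
--     while i < n and line[i].isspace():
--         i += 1
--     j = i
--     while j < n and not line[j].isspace():
--         j += 1
--     return line[i:j] if j > i else None
--
--
-- def extract_live_hosts(nmap_output: str) -> list:
--     """Extract live host IPs from nmap -sn greppable output."""
--     return [ip for ip in map(_live_ip, nmap_output.split('\n')) if ip is not None]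
-- ===== Notes on version B (the rewrite author's own statement) =====
-- stated objective: alternative
-- what changed: Replaces A's per-line whitespace tokenization (split() into a parts list, length test, parts[1]) with a filterMap over a per-line Option parser that extracts the second token by direct index scanning, never building a token list.
import Mathlib
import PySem

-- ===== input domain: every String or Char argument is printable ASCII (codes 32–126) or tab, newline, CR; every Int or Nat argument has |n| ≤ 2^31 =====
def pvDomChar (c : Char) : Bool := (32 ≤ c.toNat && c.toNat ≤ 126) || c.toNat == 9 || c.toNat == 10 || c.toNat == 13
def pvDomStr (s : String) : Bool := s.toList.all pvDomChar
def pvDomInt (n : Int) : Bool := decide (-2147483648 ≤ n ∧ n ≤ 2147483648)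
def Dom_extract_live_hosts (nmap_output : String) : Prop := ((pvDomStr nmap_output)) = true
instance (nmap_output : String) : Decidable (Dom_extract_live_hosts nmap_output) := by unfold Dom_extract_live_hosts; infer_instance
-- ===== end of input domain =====

-- B replaces A's full whitespace tokenization (split() + length test + indexing) by a
-- filterMap of a per-line Option parser that scans out the second token directly;
-- objective: alternative (same value on every input, no speed claim).

-- ===== PORT A =====
def extract_live_hosts (nmap_output : String) : List String :=
  (PySem.Chars.splitOn nmap_output.toList ['\n']).foldl
    (fun live_hosts line =>
      if PySem.Chars.startswith line "Host:".toList
           && PySem.Chars.isIn "Status: Up".toList line then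
        let parts := PySem.Chars.split₀ line
        if 2 ≤ parts.length then
          live_hosts ++ [String.mk (PySem.List.pyGetD parts 1 [])]
        else live_hosts
      else live_hosts) []

-- ===== PORT B =====
-- the three index-advancing while loops of _live_ip are transcribed as
-- dropWhile / dropWhile / takeWhile over the same character sequence
def liveIp (line : List Char) : Option String :=
  if PySem.Chars.startswith line "Host:".toList
       && PySem.Chars.isIn "Status: Up".toList line then
    let r1 := line.dropWhile (fun c => !PySem.Chars.isspace c)
    let r2 := r1.dropWhile (fun c => PySem.Chars.isspace c)
    let tok := r2.takeWhile (fun c => !PySem.Chars.isspace c)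
    if tok.isEmpty then none else some (String.mk tok)
  else none

def extract_live_hosts_alt (nmap_output : String) : List String :=
  ((PySem.Chars.splitOn nmap_output.toList ['\n']).map liveIp).filterMap id

-- ===== PRECONDITION & SPEC =====
def Spec_extract_live_hosts (nmap_output : String) (out : List String) : Prop := out = extract_live_hosts_alt nmap_output
instance (nmap_output : String) (out : List String) : Decidable (Spec_extract_live_hosts nmap_output out) := by unfold Spec_extract_live_hosts; infer_instance

-- ===== CLAIM (what is proved, stated in full; the proofs are below) =====
def Claim_equal_extract_live_hosts : Prop := ∀ (nmap_output : String), Dom_extract_live_hosts nmap_output → Spec_extract_live_hosts nmap_output (extract_live_hosts nmap_output)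

-- ===== LEMMAS AND PROOFS =====

-- split₀.go: the accumulator is prepended reversed
lemma go_acc (s cur : List Char) (acc : List (List Char)) :
    PySem.Chars.split₀.go s cur acc = acc.reverse ++ PySem.Chars.split₀.go s cur [] := by
  induction s generalizing cur acc with
  | nil =>
      simp [PySem.Chars.split₀.go]
      split <;> simp
  | cons c t ih =>
      simp only [PySem.Chars.split₀.go]
      split
      · split
        · exact ih _ _
        · rw [ih [] (cur.reverse :: acc), ih [] [cur.reverse]]; simp
      · exact ih _ _

-- a nonempty current token: it is closed off by the next whitespace run
lemma go_cur (s cur : List Char) (h : cur ≠ []) :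
    PySem.Chars.split₀.go s cur [] =
      (cur.reverse ++ s.takeWhile (fun c => !PySem.Chars.isspace c)) ::
        PySem.Chars.split₀.go (s.dropWhile (fun c => !PySem.Chars.isspace c)) [] [] := by
  induction s generalizing cur with
  | nil => simp [PySem.Chars.split₀.go, h]
  | cons c t ih =>
      simp only [PySem.Chars.split₀.go]
      by_cases hs : PySem.Chars.isspace c
      · simp [hs, h, go_acc t [] [cur.reverse],
              PySem.Chars.split₀.go]
      · simpa [hs, List.takeWhile_cons, List.dropWhile_cons] using ih (c :: cur) (by simp)

-- leading whitespace is skipped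
lemma go_ws (s : List Char) :
    PySem.Chars.split₀.go s [] [] =
      PySem.Chars.split₀.go (s.dropWhile (fun c => PySem.Chars.isspace c)) [] [] := by
  induction s with
  | nil => rfl
  | cons c t ih =>
      by_cases hs : PySem.Chars.isspace c
      · simpa [PySem.Chars.split₀.go, hs] using ih
      · simp [hs]

-- a string with a non-space head: split₀ peels off the first token
lemma split₀_cons_nonspace (c : Char) (t : List Char) (hc : PySem.Chars.isspace c = false) :
    PySem.Chars.split₀ (c :: t) =
      ((c :: t).takeWhile (fun c => !PySem.Chars.isspace c)) ::
        PySem.Chars.split₀.go ((c :: t).dropWhile (fun c => !PySem.Chars.isspace c)) [] [] := by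
  simp only [PySem.Chars.split₀, PySem.Chars.split₀.go, hc, Bool.false_eq_true, if_false]
  rw [go_cur t [c] (by simp)]
  simp [hc]

-- per-line: A's conditional append produces exactly (liveIp line).toList
lemma line_step (line : List Char) :
    (if PySem.Chars.startswith line "Host:".toList
          && PySem.Chars.isIn "Status: Up".toList line then
       (if 2 ≤ (PySem.Chars.split₀ line).length then
          [String.mk (PySem.List.pyGetD (PySem.Chars.split₀ line) 1 [])]
        else [])
     else []) = (liveIp line).toList := by
  by_cases hcond : PySem.Chars.startswith line "Host:".toList
      && PySem.Chars.isIn "Status: Up".toList line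
  · -- the line starts with 'H', a non-space character
    have hpre : "Host:".toList <+: line :=
      (PySem.Chars.startswith_iff line "Host:".toList).mp
        ((Bool.and_eq_true _ _).mp hcond).1
    obtain ⟨u, hu⟩ := hpre
    have hline : line = 'H' :: ("ost:".toList ++ u) := by rw [← hu]; rfl
    have hc : PySem.Chars.isspace 'H' = false := by decide
    rw [hline, split₀_cons_nonspace 'H' _ hc]
    rw [go_ws]
    set s := 'H' :: ("ost:".toList ++ u) with hs
    set r2 := (s.dropWhile (fun c => !PySem.Chars.isspace c)).dropWhile
        (fun c => PySem.Chars.isspace c) with hr2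
    simp only [liveIp, hcond, if_true, hline.symm]
    match hm : r2 with
    | [] =>
        simp [PySem.Chars.split₀.go, hline, ← hr2]
    | c :: t =>
        have hc2 : PySem.Chars.isspace c = false := by
          have h2 := List.head_dropWhile_not (fun c => PySem.Chars.isspace c)
            (l := s.dropWhile (fun c => !PySem.Chars.isspace c)) (by rw [← hr2]; simp)
          simp only [← hr2] at h2
          simpa using h2
        rw [show PySem.Chars.split₀.go (c :: t) [] [] = PySem.Chars.split₀ (c :: t) from rfl,
            split₀_cons_nonspace c t hc2]
        have htok : (c :: t).takeWhile (fun c => !PySem.Chars.isspace c) ≠ [] := by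
          simp [hc2]
        simp [PySem.List.pyGetD, hline, ← hr2, htok, List.isEmpty_iff]
  · simp only [liveIp]
    rw [if_neg hcond, if_neg hcond]
    rfl

-- the fold over lines is the filterMap, generalized over the accumulator
lemma fold_eq (lines : List (List Char)) (acc : List String) :
    lines.foldl
      (fun live_hosts line =>
        if PySem.Chars.startswith line "Host:".toList
             && PySem.Chars.isIn "Status: Up".toList line then
          let parts := PySem.Chars.split₀ line
          if 2 ≤ parts.length then
            live_hosts ++ [String.mk (PySem.List.pyGetD parts 1 [])]
          else live_hosts
        else live_hosts) acc
      = acc ++ (lines.map liveIp).filterMap id := by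
  induction lines generalizing acc with
  | nil => simp
  | cons l t ih =>
      simp only [List.foldl_cons, List.map_cons, List.filterMap_cons]
      rw [ih]
      have := line_step l
      by_cases hcond : PySem.Chars.startswith l "Host:".toList
          && PySem.Chars.isIn "Status: Up".toList l
      · simp only [hcond, if_true] at this ⊢
        cases hl : liveIp l with
        | none => rw [hl] at this; simp at this; simp [this]
        | some v =>
            rw [hl] at this
            by_cases h2 : 2 ≤ (PySem.Chars.split₀ l).length
            · simp [h2] at this; simp [h2, this]
            · simp [h2] at this
      · simp only [hcond] at this ⊢
        cases hl : liveIp l with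
        | none => simp
        | some v => rw [hl] at this; simp at this

-- ===== VERDICT (by name: the statement is the Claim_ definition above) =====
theorem extract_live_hosts_spec : Claim_equal_extract_live_hosts := by
  intro s _
  show extract_live_hosts s = extract_live_hosts_alt s
  unfold extract_live_hosts extract_live_hosts_alt
  simpa using fold_eq (PySem.Chars.splitOn s.toList ['\n']) []
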